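-- pv_equiv track=rewrite | github.com/adrianwedd/code-interpreter-hacking | sandbox/py_json_files/home/sandbox/.local/lib/python3.8/site-packages/jax/_src/api_util.py | rebase_donate_argnums
-- ===== SOURCE A (Python) =====
-- from typing import Any, Dict, Iterable, Tuple, Union, Optional
--
-- def rebase_donate_argnums(donate_argnums, static_argnums) -> Tuple[int, ...]:
--   """Shifts donate to account for static.
--
--   >>> rebase_donate_argnums((3, 4), (0, 1))
--   (1, 2)
--
--   Args:
--     donate_argnums: An iterable of ints.
--     static_argnums: An iterable of ints.
--
--   Returns:
--     A tuple of unique, sorted integer values based on donate_argnums with each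
--     element offset to account for static_argnums.
--   """
--   if not (static_argnums or donate_argnums):
--     return tuple(sorted(donate_argnums))
--
--   static_argnums = sorted(set(static_argnums))
--   donate_argnums = sorted(set(donate_argnums))
--   i = j = o = 0
--   out = []
--   while j < len(donate_argnums):
--     if i < len(static_argnums) and static_argnums[i] == donate_argnums[j]:
--       raise ValueError(f"`static_argnums` {static_argnums} and "
--                        f"`donate_argnums` {donate_argnums} cannot intersect.")
--
--     if i < len(static_argnums) and static_argnums[i] < donate_argnums[j]:
--       o += 1
--       i += 1
--     else:
--       out.append(donate_argnums[j] - o)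
--       j += 1
--   return tuple(out)
-- ===== SOURCE B (Python) =====
-- def rebase_donate_argnums(donate_argnums, static_argnums):
--   if not (static_argnums or donate_argnums):
--     return tuple(sorted(donate_argnums))
--   static_argnums = sorted(set(static_argnums))
--   donate_argnums = sorted(set(donate_argnums))
--   static_set = set(static_argnums)
--   if any(d in static_set for d in donate_argnums):
--     raise ValueError(f"`static_argnums` {static_argnums} and "
--                      f"`donate_argnums` {donate_argnums} cannot intersect.")
--   return tuple(d - sum(1 for s in static_argnums if s < d)
--                for d in donate_argnums)
-- ===== Notes on version B (the rewrite author's own statement) =====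
-- stated objective: simpler
-- what changed: Replaced the three-counter two-pointer merge loop with an up-front disjointness check and a per-element pass that subtracts the count of smaller static argnums from each donated argnum.
import Mathlib
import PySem

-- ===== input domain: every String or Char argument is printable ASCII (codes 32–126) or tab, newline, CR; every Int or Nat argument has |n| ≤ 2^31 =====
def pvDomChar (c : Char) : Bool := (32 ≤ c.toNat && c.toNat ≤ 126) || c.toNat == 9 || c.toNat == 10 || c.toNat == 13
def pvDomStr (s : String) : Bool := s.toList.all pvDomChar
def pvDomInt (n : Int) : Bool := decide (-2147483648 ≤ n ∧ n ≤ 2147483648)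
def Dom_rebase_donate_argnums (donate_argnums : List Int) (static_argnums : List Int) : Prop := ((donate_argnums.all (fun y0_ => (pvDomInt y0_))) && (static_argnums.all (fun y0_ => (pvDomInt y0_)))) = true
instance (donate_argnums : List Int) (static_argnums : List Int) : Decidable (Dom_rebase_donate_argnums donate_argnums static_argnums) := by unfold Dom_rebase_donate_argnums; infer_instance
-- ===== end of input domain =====

-- B replaces A's two-pointer merge with an up-front disjointness check and a
-- per-element "subtract the number of smaller static argnums" pass (objective: simpler).


-- ===== PORT A =====
-- A's while loop over indices i, j with offset o, as structural recursion on the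
-- two (sorted, deduped) lists; the `raise ValueError` branch returns [] (outside Pre_).
def pvMergeA : List Int → List Int → Int → List Int
  | _, [], _ => []
  | [], dj :: d', o => (dj - o) :: pvMergeA [] d' o
  | si :: s', dj :: d', o =>
      if si == dj then []  -- ValueError in Python; excluded by Pre_
      else if si < dj then pvMergeA s' (dj :: d') (o + 1)
      else (dj - o) :: pvMergeA (si :: s') d' o
  termination_by s d _ => s.length + d.length

def rebase_donate_argnums (donate_argnums : List Int) (static_argnums : List Int) : List Int :=
  if static_argnums.isEmpty && donate_argnums.isEmpty then
    PySem.List.sorted donate_argnums (fun x => x)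
  else
    let s := PySem.List.sorted (PySem.Set.ofList static_argnums) (fun x => x)
    let d := PySem.List.sorted (PySem.Set.ofList donate_argnums) (fun x => x)
    pvMergeA s d 0

-- ===== PORT B =====
def rebase_donate_argnums_alt (donate_argnums : List Int) (static_argnums : List Int) : List Int :=
  if static_argnums.isEmpty && donate_argnums.isEmpty then
    PySem.List.sorted donate_argnums (fun x => x)
  else
    let s := PySem.List.sorted (PySem.Set.ofList static_argnums) (fun x => x)
    let d := PySem.List.sorted (PySem.Set.ofList donate_argnums) (fun x => x)
    if d.any (fun x => PySem.Set.contains (PySem.Set.ofList s) x) then []  -- ValueError in Python; excluded by Pre_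
    else d.map (fun x => x - (s.countP (fun v => decide (v < x)) : Int))

-- ===== PRECONDITION & SPEC =====
-- Pre_ excludes exactly the inputs sharing an element, on which the Python A
-- (and the Python B alike) raises ValueError.
def Pre_rebase_donate_argnums (donate_argnums : List Int) (static_argnums : List Int) : Prop :=
  ∀ x ∈ donate_argnums, x ∉ static_argnums
instance (donate_argnums : List Int) (static_argnums : List Int) : Decidable (Pre_rebase_donate_argnums donate_argnums static_argnums) := by unfold Pre_rebase_donate_argnums; infer_instance

def pvWitness_rebase_donate_argnums : List Int × List Int := ([3, 4], [0, 1])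

def Spec_rebase_donate_argnums (donate_argnums : List Int) (static_argnums : List Int) (out : List Int) : Prop := out = rebase_donate_argnums_alt donate_argnums static_argnums
instance (donate_argnums : List Int) (static_argnums : List Int) (out : List Int) : Decidable (Spec_rebase_donate_argnums donate_argnums static_argnums out) := by unfold Spec_rebase_donate_argnums; infer_instance

-- ===== CLAIM (what is proved, stated in full; the proofs are below) =====
def Claim_equal_rebase_donate_argnums : Prop := ∀ (donate_argnums : List Int) (static_argnums : List Int), Dom_rebase_donate_argnums donate_argnums static_argnums → Pre_rebase_donate_argnums donate_argnums static_argnums → Spec_rebase_donate_argnums donate_argnums static_argnums (rebase_donate_argnums donate_argnums static_argnums)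

-- ===== LEMMAS AND PROOFS =====

-- A's merge on a strictly increasing static list s and a weakly increasing donate
-- list d, disjoint from s, equals B's per-element count formula with offset o.
lemma pvMergeA_eq (s d : List Int) (o : Int)
    (hs : s.Pairwise (· < ·)) (hd : d.Pairwise (· ≤ ·))
    (hdis : ∀ x ∈ d, x ∉ s) :
    pvMergeA s d o = d.map (fun x => x - o - (s.countP (fun v => decide (v < x)) : Int)) := by
  induction s, d, o using pvMergeA.induct with
  | case1 s o => simp [pvMergeA]
  | case2 dj d' o ih =>
      simp only [pvMergeA, List.map_cons, List.countP_nil, Nat.cast_zero, sub_zero]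
      rw [ih (by simp) (hd.sublist (by simp)) (by simp)]
      simp
  | case3 si s' dj d' o heq =>
      exfalso
      exact hdis dj (by simp) (by simp only [beq_iff_eq] at heq; simp [heq])
  | case4 si s' dj d' o heq hlt ih =>
      rw [pvMergeA, if_neg (by simpa using heq), if_pos (by simpa using hlt)]
      rw [ih hs.of_cons hd (fun x hx hm => hdis x hx (List.mem_cons_of_mem _ hm))]
      apply List.map_congr_left
      intro x hx
      have hdjx : dj ≤ x := by
        rcases List.mem_cons.mp hx with rfl | h
        · omega
        · exact (List.pairwise_cons.mp hd).1 x h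
      have hx' : si < x := lt_of_lt_of_le (by simpa using hlt) hdjx
      simp [hx']
      ring
  | case5 si s' dj d' o heq hlt ih =>
      rw [pvMergeA, if_neg (by simpa using heq), if_neg (by simpa using hlt)]
      have hsi : ¬ si < dj := by simpa using hlt
      have hc0 : (si :: s').countP (fun v => decide (v < dj)) = 0 := by
        rw [List.countP_eq_zero]
        intro v hv
        rcases List.mem_cons.mp hv with rfl | hv'
        · simpa using hsi
        · have := (List.pairwise_cons.mp hs).1 v hv'
          simp; omega
      rw [ih hs (hd.sublist (by simp)) (fun x hx => hdis x (List.mem_cons_of_mem _ hx))]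
      simp [hc0]

-- ===== VERDICT (by name: the statement is the Claim_ definition above) =====
theorem rebase_donate_argnums_spec : Claim_equal_rebase_donate_argnums := by
  intro donate static _hdom hpre
  unfold Spec_rebase_donate_argnums rebase_donate_argnums rebase_donate_argnums_alt
  split
  · rfl
  · have hmem : ∀ x ∈ PySem.List.sorted (PySem.Set.ofList donate) (fun x => x),
        x ∉ PySem.List.sorted (PySem.Set.ofList static) (fun x => x) := by
      intro x hx hxs
      have hxd : x ∈ donate := by
        have := (PySem.List.mem_sorted _ _ _ _).mp hx
        simpa [PySem.Set.mem_ofList] using this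
      have hxst : x ∈ static := by
        have := (PySem.List.mem_sorted _ _ _ _).mp hxs
        simpa [PySem.Set.mem_ofList] using this
      exact hpre x hxd hxst
    have hany : (PySem.List.sorted (PySem.Set.ofList donate) (fun x => x)).any
        (fun x => PySem.Set.contains (PySem.Set.ofList (PySem.List.sorted (PySem.Set.ofList static) (fun x => x))) x) = false := by
      simp only [List.any_eq_false]
      intro x hx
      have := hmem x hx
      simp only [PySem.Set.contains_eq_listContains]
      simp [PySem.Set.mem_ofList, this]
    simp only [hany, Bool.false_eq_true, if_false]
    rw [pvMergeA_eq _ _ 0 (PySem.List.sorted_ofList_pairwise_lt static)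
        (by simpa using PySem.List.sorted_pairwise (PySem.Set.ofList donate) (fun x => x)) hmem]
    simp
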